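-- pv_equiv track=rewrite | github.com/softstat/coding_test | 프로그래머스/1/82612. 부족한 금액 계산하기/부족한 금액 계산하기.py | solution
-- ===== SOURCE A (Python) =====
-- def solution(price, money, count):
--     answer = -1
--     pr = 0
--     for i in range(count+1):
--         pr += price*i
--         answer = pr-money
--     if money>pr:
--         answer = 0
--     return answer
-- ===== SOURCE B (Python) =====
-- def solution(price, money, count):
--     lack = price * count * (count + 1) // 2 - money
--     return lack if lack > 0 else 0
-- ===== Notes on version B (the rewrite author's own statement) =====
-- stated objective: faster
-- what changed: Replaces the O(count) accumulation loop by the closed-form arithmetic-series formula price*count*(count+1)//2 with a max-with-0 clamp.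
-- outside the precondition, e.g. on solution(1, -5, -1): A returns -1, B returns 5
import Mathlib
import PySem

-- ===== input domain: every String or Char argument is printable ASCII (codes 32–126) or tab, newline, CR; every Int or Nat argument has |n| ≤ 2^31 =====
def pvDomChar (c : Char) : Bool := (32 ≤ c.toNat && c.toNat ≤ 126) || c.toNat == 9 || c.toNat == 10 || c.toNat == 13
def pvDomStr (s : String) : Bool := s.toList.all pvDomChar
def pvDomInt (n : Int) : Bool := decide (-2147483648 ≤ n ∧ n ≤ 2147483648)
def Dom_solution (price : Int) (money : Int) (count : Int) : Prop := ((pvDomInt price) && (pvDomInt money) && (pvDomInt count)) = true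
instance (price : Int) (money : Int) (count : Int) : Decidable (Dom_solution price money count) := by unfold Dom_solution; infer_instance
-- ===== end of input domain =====

-- B replaces A's O(count) accumulation loop by the closed-form series price*count*(count+1)//2, clamped at 0.


-- ===== PORT A =====
def solution (price : Int) (money : Int) (count : Int) : Int :=
  let st := (PySem.List.pyRange 0 (count + 1) 1).foldl
      (fun (st : Int × Int) i =>
        let pr := st.2 + price * i
        (pr - money, pr))
      (-1, 0)
  let answer := st.1
  let pr := st.2
  if money > pr then 0 else answer

-- ===== PORT B =====
def solution_alt (price : Int) (money : Int) (count : Int) : Int :=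
  let lack := PySem.Int.floordiv (price * count * (count + 1)) 2 - money
  if lack > 0 then lack else 0

-- ===== PRECONDITION & SPEC =====
-- Pre_ excludes negative counts (outside the task's natural domain): A's -1/0 sentinel there is
-- leftover loop state from the empty range, which B's closed form has no reason to reproduce.
def Pre_solution (price : Int) (money : Int) (count : Int) : Prop := 0 ≤ count
instance (price : Int) (money : Int) (count : Int) : Decidable (Pre_solution price money count) := by unfold Pre_solution; infer_instance
def pvWitness_solution : Int × Int × Int := (3, 20, 4)
def Spec_solution (price : Int) (money : Int) (count : Int) (out : Int) : Prop := out = solution_alt price money count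
instance (price : Int) (money : Int) (count : Int) (out : Int) : Decidable (Spec_solution price money count out) := by unfold Spec_solution; infer_instance

-- ===== CLAIM (what is proved, stated in full; the proofs are below) =====
def Claim_equal_solution : Prop := ∀ (price : Int) (money : Int) (count : Int), Dom_solution price money count → Pre_solution price money count → Spec_solution price money count (solution price money count)

-- ===== LEMMAS AND PROOFS =====

-- A's loop over range(count+1): final pr satisfies 2*pr = price*count*(count+1), final answer = pr - money.
lemma loopA (price money : Int) : ∀ n : Nat, ∃ P : Int,
    (PySem.List.pyRange 0 ((n : Int) + 1) 1).foldl
      (fun (st : Int × Int) i =>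
        let pr := st.2 + price * i
        (pr - money, pr))
      (-1, 0) = (P - money, P) ∧ 2 * P = price * n * (n + 1) := by
  intro n
  induction n with
  | zero =>
    refine ⟨0, ?_, by ring⟩
    rw [show ((0 : Nat) : Int) + 1 = 0 + 1 by norm_num, PySem.List.pyRange_one_singleton]
    simp
  | succ m ih =>
    obtain ⟨P, hP, h2⟩ := ih
    refine ⟨P + price * (m + 1), ?_, ?_⟩
    · rw [show ((m + 1 : Nat) : Int) + 1 = (((m : Int) + 1) + 1) by push_cast; ring,
        PySem.List.pyRange_one_succ_right (by positivity), List.foldl_append, hP]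
      simp
    · push_cast
      nlinarith [h2]

theorem solution_spec : Claim_equal_solution := by
  intro price money count _ hpre
  unfold Spec_solution solution solution_alt
  obtain ⟨P, hP, h2⟩ := loopA price money count.toNat
  rw [show count = (count.toNat : Int) from (Int.toNat_of_nonneg hpre).symm, hP]
  have hdiv : PySem.Int.floordiv (price * (count.toNat : Int) * ((count.toNat : Int) + 1)) 2 = P := by
    rw [← h2, PySem.Int.floordiv_eq_ediv_of_pos (by norm_num)]
    omega
  rw [hdiv]
  simp only
  split_ifs <;> omega
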